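-- pv_equiv track=rewrite | github.com/oakkao/my_git_network | analysis/graph_weights.py | build_weighted_friends
-- ===== SOURCE A (Python) =====
-- def mutual_friends(
--     user_a: str,
--     user_b: str,
--     friends_dict: dict[str, list[str]],
-- ) -> list[str]:
--     """Return users who are friends with *both* user_a and user_b."""
--     set_a = set(friends_dict.get(user_a, []))
--     set_b = set(friends_dict.get(user_b, []))
--     return list(set_a & set_b)
--
-- def build_weighted_friends(
--     friends_dict: dict[str, list[str]],
--     node_subset: list[str] | None = None,
-- ) -> dict[str, dict[str, int]]:
--     """
--     Build a weighted adjacency dict restricted to *node_subset*.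
--
--     Args:
--         friends_dict: undirected adjacency {user: [friends]}
--         node_subset : if given, only include nodes in this collection.
--                       Defaults to all nodes in friends_dict.
--
--     Returns:
--         {user: {friend: weight}}  where weight = |mutual_friends| + 1
--     """
--     active: set[str] = set(node_subset) if node_subset is not None else set(friends_dict.keys())
--
--     weighted: dict[str, dict[str, int]] = {}
--
--     for user in active:
--         neighbours = list(set(friends_dict.get(user, [])) & active)
--         weighted[user] = {
--             friend: len(mutual_friends(user, friend, friends_dict)) + 1
--             for friend in neighbours
--         }
--
--     return weighted
-- ===== SOURCE B (Python) =====
-- def build_weighted_friends(friends_dict, node_subset=None):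
--     active = set(node_subset) if node_subset is not None else set(friends_dict.keys())
--
--     # Pass 1: reverse index  z -> [users that have z in their (deduped) friend list]
--     rev = {}
--     for user, friends in friends_dict.items():
--         for z in dict.fromkeys(friends):
--             rev.setdefault(z, []).append(user)
--
--     # Pass 2: count[a, b] = number of common friends z of a and b
--     count = {}
--     for z, users in rev.items():
--         for a in users:
--             for b in users:
--                 count[a, b] = count.get((a, b), 0) + 1
--
--     # Pass 3: assemble the weighted adjacency; +1 so zero-mutual edges keep weight 1
--     weighted = {}
--     for user in active:
--         weighted[user] = {
--             friend: count.get((user, friend), 0) + 1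
--             for friend in set(friends_dict.get(user, [])) & active
--         }
--     return weighted
-- ===== Notes on version B (the rewrite author's own statement) =====
-- stated objective: alternative
-- what changed: A recomputes two friend sets and their intersection per (user, friend) edge via mutual_friends; B instead makes three passes: builds a reverse index z -> users having z as friend, accumulates a flat counter of common-friend pairs from it, and assembles edge weights by counter lookup.
import Mathlib
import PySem

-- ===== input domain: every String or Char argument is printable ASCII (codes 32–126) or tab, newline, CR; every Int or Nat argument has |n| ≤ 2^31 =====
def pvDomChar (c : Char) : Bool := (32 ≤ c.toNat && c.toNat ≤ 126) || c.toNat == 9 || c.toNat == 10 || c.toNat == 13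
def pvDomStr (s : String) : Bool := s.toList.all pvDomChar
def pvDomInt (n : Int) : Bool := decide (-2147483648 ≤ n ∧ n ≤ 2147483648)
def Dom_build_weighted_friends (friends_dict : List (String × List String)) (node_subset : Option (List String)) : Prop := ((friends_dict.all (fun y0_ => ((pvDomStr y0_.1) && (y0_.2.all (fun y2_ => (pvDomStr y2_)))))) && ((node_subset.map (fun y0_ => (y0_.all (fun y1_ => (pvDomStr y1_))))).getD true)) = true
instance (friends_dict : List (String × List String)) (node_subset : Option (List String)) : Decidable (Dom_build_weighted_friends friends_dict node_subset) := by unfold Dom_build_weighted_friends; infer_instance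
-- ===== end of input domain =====

-- B replaces A's per-edge mutual_friends set intersections by three passes (a reverse friend index,
-- a flat counter of common-friend pairs, one assembly loop); objective: alternative decomposition.

-- ===== PORT A =====
def mutual_friends (user_a : String) (user_b : String) (friends_dict : PySem.Dict String (List String)) : List String :=
  let set_a : PySem.Set String := PySem.Set.ofList (friends_dict.getD user_a [])
  let set_b : PySem.Set String := PySem.Set.ofList (friends_dict.getD user_b [])
  PySem.Set.inter set_a set_b

def build_weighted_friends (friends_dict : List (String × List String)) (node_subset : Option (List String)) : List (String × List (String × Int)) :=
  let fd : PySem.Dict String (List String) := PySem.Dict.mk friends_dict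
  let active : PySem.Set String :=
    match node_subset with
    | some ns => PySem.Set.ofList ns
    | none => PySem.Set.ofList fd.keys
  let weighted : PySem.Dict String (PySem.Dict String Int) :=
    active.foldl (fun w user =>
      let neighbours : List String := PySem.Set.inter (PySem.Set.ofList (fd.getD user [])) active
      w.insert user
        (neighbours.foldl (fun m friend =>
            m.insert friend (((mutual_friends user friend fd).length : Int) + 1)) PySem.Dict.empty))
      PySem.Dict.empty
  weighted.items.map (fun p => (p.1, p.2.items))

-- ===== PORT B =====
def build_weighted_friends_alt (friends_dict : List (String × List String)) (node_subset : Option (List String)) : List (String × List (String × Int)) :=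
  let fd : PySem.Dict String (List String) := PySem.Dict.mk friends_dict
  let active : PySem.Set String :=
    match node_subset with
    | some ns => PySem.Set.ofList ns
    | none => PySem.Set.ofList fd.keys
  -- Pass 1: reverse index  z -> [users that have z in their (deduped) friend list]
  let rev : PySem.Dict String (List String) :=
    friends_dict.foldl (fun r p =>
      (PySem.List.dedup p.2).foldl (fun r z => r.modify z [] (fun us => us ++ [p.1])) r)
      PySem.Dict.empty
  -- Pass 2: count[(a, b)] = number of common friends of a and b
  let count : PySem.Dict (String × String) Int :=
    rev.items.foldl (fun c q =>
      q.2.foldl (fun c a =>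
        q.2.foldl (fun c b => c.insert (a, b) (c.getD (a, b) 0 + 1)) c) c)
      PySem.Dict.empty
  -- Pass 3: assemble
  let weighted : PySem.Dict String (PySem.Dict String Int) :=
    active.foldl (fun w user =>
      w.insert user
        ((PySem.Set.inter (PySem.Set.ofList (fd.getD user [])) active).foldl
          (fun m friend => m.insert friend (count.getD (user, friend) 0 + 1)) PySem.Dict.empty))
      PySem.Dict.empty
  weighted.items.map (fun p => (p.1, p.2.items))

-- ===== PRECONDITION & SPEC =====
-- Pre_ excludes association lists with duplicate keys, which do not represent any Python dict
-- (a dict's keys are unique); there A's first-match lookup and B's pass over all entries disagree.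
def Pre_build_weighted_friends (friends_dict : List (String × List String)) (node_subset : Option (List String)) : Prop :=
  (friends_dict.map Prod.fst).Nodup

instance (friends_dict : List (String × List String)) (node_subset : Option (List String)) : Decidable (Pre_build_weighted_friends friends_dict node_subset) := by unfold Pre_build_weighted_friends; infer_instance

def pvWitness_build_weighted_friends : (List (String × List String)) × Option (List String) :=
  ([("a", ["b", "c"]), ("b", ["a", "c"]), ("c", ["a", "b"])], some ["a", "b"])

def Spec_build_weighted_friends (friends_dict : List (String × List String)) (node_subset : Option (List String)) (out : List (String × List (String × Int))) : Prop := out = build_weighted_friends_alt friends_dict node_subset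
instance (friends_dict : List (String × List String)) (node_subset : Option (List String)) (out : List (String × List (String × Int))) : Decidable (Spec_build_weighted_friends friends_dict node_subset out) := by unfold Spec_build_weighted_friends; infer_instance

-- ===== CLAIM (what is proved, stated in full; the proofs are below) =====
def Claim_equal_build_weighted_friends : Prop := ∀ (friends_dict : List (String × List String)) (node_subset : Option (List String)), Dom_build_weighted_friends friends_dict node_subset → Pre_build_weighted_friends friends_dict node_subset → Spec_build_weighted_friends friends_dict node_subset (build_weighted_friends friends_dict node_subset)

-- ===== LEMMAS AND PROOFS =====

-- Named copies of B's intermediate structures (used by the proofs only).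
def Fof (fd : List (String × List String)) (u : String) : List String :=
  (PySem.Dict.mk fd).getD u []

def revOf (fd : List (String × List String)) : PySem.Dict String (List String) :=
  fd.foldl (fun r p =>
      (PySem.List.dedup p.2).foldl (fun r z => r.modify z [] (fun us => us ++ [p.1])) r)
    PySem.Dict.empty

def Pof (fd : List (String × List String)) : List (String × String) :=
  fd.flatMap (fun p => (PySem.List.dedup p.2).map (fun z => (z, p.1)))

def countOf (fd : List (String × List String)) : PySem.Dict (String × String) Int :=
  (revOf fd).items.foldl (fun c q =>
      q.2.foldl (fun c a =>
        q.2.foldl (fun c b => c.insert (a, b) (c.getD (a, b) 0 + 1)) c) c)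
    PySem.Dict.empty

def Lof (fd : List (String × List String)) : List (String × String) :=
  (revOf fd).items.flatMap (fun q => q.2.flatMap (fun x => q.2.map (fun y => (x, y))))

theorem rev_eq_flat (fd : List (String × List String)) :
    revOf fd = (Pof fd).foldl (fun r q => r.modify q.1 [] (fun us => us ++ [q.2])) PySem.Dict.empty := by
  unfold revOf Pof
  rw [List.foldl_flatMap]
  simp only [List.foldl_map]

theorem revOf_getD (fd : List (String × List String)) (z : String) :
    (revOf fd).getD z [] = ((Pof fd).filter (fun q => q.1 == z)).map (·.2) := by
  rw [rev_eq_flat]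
  rw [PySem.Dict.getD_foldl_modify_append]
  simp [PySem.Dict.getD_empty]

theorem revOf_keys (fd : List (String × List String)) :
    (revOf fd).keys = PySem.Set.ofList ((Pof fd).map Prod.fst) := by
  rw [rev_eq_flat]
  rw [PySem.Dict.keys_foldl_modify_key]
  simp [PySem.Dict.keys_empty, PySem.Set.update_nil_left]

theorem nodup_keys_revOf (fd : List (String × List String)) : (revOf fd).keys.Nodup := by
  rw [revOf_keys]; exact PySem.Set.nodup_ofList _

theorem filter_beq_of_nodup (l : List String) (z : String) (h : l.Nodup) :
    l.filter (fun x => x == z) = if z ∈ l then [z] else [] := by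
  induction l with
  | nil => simp
  | cons x t ih =>
    rcases List.nodup_cons.mp h with ⟨hx, ht⟩
    by_cases hxz : x = z
    · subst hxz
      simp [ih ht, hx]
    · simp [hxz, ih ht, Ne.symm hxz]

theorem R_eq (fd : List (String × List String)) (z : String) :
    (revOf fd).getD z [] = (fd.filter (fun p => decide (z ∈ p.2))).map Prod.fst := by
  rw [revOf_getD]
  induction fd with
  | nil => simp [Pof]
  | cons p t ih =>
    have hhead : ((PySem.List.dedup p.2).map (fun z' => (z', p.1))).filter (fun q => q.1 == z)
        = if z ∈ p.2 then [(z, p.1)] else [] := by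
      rw [List.filter_map]
      have : (PySem.List.dedup p.2).filter (fun x => x == z) = if z ∈ p.2 then [z] else [] := by
        rw [filter_beq_of_nodup _ _ (PySem.List.nodup_dedup p.2)]
        simp
      simp only [Function.comp_def] at *
      rw [this]
      split_ifs <;> simp
    show ((Pof (p :: t)).filter (fun q => q.1 == z)).map (·.2) = _
    have hP : Pof (p :: t) = (PySem.List.dedup p.2).map (fun z' => (z', p.1)) ++ Pof t := by
      simp [Pof]
    rw [hP, List.filter_append, List.map_append, hhead, ih, List.filter_cons]
    by_cases hz : z ∈ p.2 <;> simp [hz]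

theorem nodup_R (fd : List (String × List String)) (hnd : (fd.map Prod.fst).Nodup) (z : String) :
    ((revOf fd).getD z []).Nodup := by
  rw [R_eq]
  exact hnd.sublist (List.Sublist.map Prod.fst (List.filter_sublist (l := fd)))

theorem Fof_of_mem (fd : List (String × List String)) (hnd : (fd.map Prod.fst).Nodup)
    {p : String × List String} (hp : p ∈ fd) : Fof fd p.1 = p.2 := by
  apply PySem.Dict.getD_of_mem_items (d := PySem.Dict.mk fd) (k := p.1) (v := p.2)
  · exact hp
  · simpa [PySem.Dict.keys] using hnd

theorem Fof_of_not_mem (fd : List (String × List String)) {u : String}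
    (h : u ∉ fd.map Prod.fst) : Fof fd u = [] := by
  apply PySem.Dict.getD_of_not_contains
  rw [PySem.Dict.contains_eq_decide_mem_keys]
  simpa [PySem.Dict.keys] using h

theorem mem_R (fd : List (String × List String)) (hnd : (fd.map Prod.fst).Nodup)
    (a z : String) :
    a ∈ (revOf fd).getD z [] ↔ a ∈ fd.map Prod.fst ∧ z ∈ Fof fd a := by
  rw [R_eq]
  constructor
  · rintro h
    rcases List.mem_map.mp h with ⟨p, hp, rfl⟩
    rcases List.mem_filter.mp hp with ⟨hpfd, hz⟩
    refine ⟨List.mem_map.mpr ⟨p, hpfd, rfl⟩, ?_⟩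
    rw [Fof_of_mem fd hnd hpfd]
    exact of_decide_eq_true hz
  · rintro ⟨ha, hz⟩
    rcases List.mem_map.mp ha with ⟨p, hpfd, rfl⟩
    rw [Fof_of_mem fd hnd hpfd] at hz
    exact List.mem_map.mpr ⟨p, List.mem_filter.mpr ⟨hpfd, decide_eq_true hz⟩, rfl⟩

theorem pairs_count (vs us : List String) (a b : String) :
    (vs.flatMap (fun x => us.map (fun y => (x, y)))).count (a, b) = vs.count a * us.count b := by
  induction vs with
  | nil => simp
  | cons x t ih =>
    rw [List.flatMap_cons, List.count_append, ih, List.count_cons]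
    by_cases hx : x = a
    · subst hx
      have hcm : (us.map (fun y => (x, y))).count (x, b) = us.count b :=
        List.count_map_of_injective _ _ (fun y z h => by simpa using h) _
      rw [hcm]
      simp
      ring
    · have h0 : (us.map (fun y => (x, y))).count (a, b) = 0 := by
        rw [List.count_eq_zero]
        intro hmem
        rcases List.mem_map.mp hmem with ⟨y, _, hy⟩
        exact hx (congrArg Prod.fst hy)
      simp [h0, hx]

theorem flat_count (R : String → List String) (hR : ∀ z, (R z).Nodup) (a b : String) :
    ∀ zs : List String,
      (zs.flatMap (fun z => (R z).flatMap (fun x => (R z).map (fun y => (x, y))))).count (a, b)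
        = zs.countP (fun z => decide (a ∈ R z) && decide (b ∈ R z)) := by
  intro zs
  induction zs with
  | nil => simp
  | cons z t ih =>
    rw [List.flatMap_cons, List.count_append, ih, pairs_count, List.countP_cons]
    by_cases ha : a ∈ R z <;> by_cases hb : b ∈ R z <;>
      simp [List.count_eq_one_of_mem (hR z), List.count_eq_zero_of_not_mem, ha, hb,
        Nat.add_comm]

theorem Lof_count (fd : List (String × List String)) (hnd : (fd.map Prod.fst).Nodup)
    (a b : String) :
    (Lof fd).count (a, b)
      = (revOf fd).keys.countP
          (fun z => decide (a ∈ (revOf fd).getD z []) && decide (b ∈ (revOf fd).getD z [])) := by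
  unfold Lof
  rw [PySem.Dict.items_eq_map_keys (revOf fd) (nodup_keys_revOf fd) []]
  rw [List.flatMap_map]
  exact flat_count _ (fun z => nodup_R fd hnd z) a b _

theorem countOf_getD (fd : List (String × List String)) (a b : String) :
    (countOf fd).getD (a, b) 0 = ((Lof fd).count (a, b) : Int) := by
  have h : countOf fd
      = (Lof fd).foldl (fun c q => c.insert q (c.getD q 0 + 1)) PySem.Dict.empty := by
    unfold countOf Lof
    simp only [List.foldl_flatMap, List.foldl_map]
  rw [h, PySem.Dict.getD_foldl_insert_add_one]
  simp [PySem.Dict.getD_empty]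

theorem inter_length (fd : List (String × List String)) (hnd : (fd.map Prod.fst).Nodup)
    (a b : String) :
    (PySem.Set.inter (PySem.Set.ofList (Fof fd a)) (PySem.Set.ofList (Fof fd b))).length
      = (revOf fd).keys.countP
          (fun z => decide (a ∈ (revOf fd).getD z []) && decide (b ∈ (revOf fd).getD z [])) := by
  rw [List.countP_eq_length_filter]
  apply List.Perm.length_eq
  apply (List.perm_ext_iff_of_nodup ?_ ?_).mpr
  · intro z
    rw [PySem.Set.mem_inter, PySem.Set.mem_ofList, PySem.Set.mem_ofList, List.mem_filter]
    simp only [Bool.and_eq_true, decide_eq_true_eq, mem_R fd hnd]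
    constructor
    · rintro ⟨hza, hzb⟩
      have hak : a ∈ fd.map Prod.fst := by
        by_contra h
        rw [Fof_of_not_mem fd h] at hza
        simp at hza
      have hbk : b ∈ fd.map Prod.fst := by
        by_contra h
        rw [Fof_of_not_mem fd h] at hzb
        simp at hzb
      refine ⟨?_, ⟨hak, hza⟩, ⟨hbk, hzb⟩⟩
      rw [revOf_keys, PySem.Set.mem_ofList]
      rcases List.mem_map.mp hak with ⟨p, hpfd, rfl⟩
      refine List.mem_map.mpr ⟨(z, p.1), ?_, rfl⟩
      unfold Pof
      refine List.mem_flatMap.mpr ⟨p, hpfd, List.mem_map.mpr ⟨z, ?_, rfl⟩⟩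
      rw [PySem.List.mem_dedup]
      rw [Fof_of_mem fd hnd hpfd] at hza
      exact hza
    · rintro ⟨_, ⟨_, hza⟩, ⟨_, hzb⟩⟩
      exact ⟨hza, hzb⟩
  · exact PySem.Set.nodup_inter _ _ (PySem.Set.nodup_ofList _)
  · exact (nodup_keys_revOf fd).filter _

theorem core_equal (fd : List (String × List String)) (hnd : (fd.map Prod.fst).Nodup)
    (a b : String) :
    ((mutual_friends a b (PySem.Dict.mk fd)).length : Int) = (countOf fd).getD (a, b) 0 := by
  have h := inter_length fd hnd a b
  rw [countOf_getD, Lof_count fd hnd]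
  unfold mutual_friends
  dsimp only
  simp only [Fof] at h
  exact_mod_cast h

theorem fold_insert_items {ν : Type} (l : List String) (hl : l.Nodup) (v : String → ν) :
    (l.foldl (fun m x => m.insert x (v x)) (PySem.Dict.empty : PySem.Dict String ν)).items
      = l.map (fun x => (x, v x)) := by
  have h := PySem.Dict.items_foldl_insert_fresh (d := (PySem.Dict.empty : PySem.Dict String ν))
    (l := l) (k := fun x => x) (v := v)
    (by intro a _; simp [PySem.Dict.contains_empty]) (by simpa using hl)
  simpa [PySem.Dict.empty] using h

theorem assemble (fd : List (String × List String)) (hnd : (fd.map Prod.fst).Nodup)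
    (active : PySem.Set String) (hact : active.Nodup) :
    ((active.foldl (fun w user =>
        w.insert user
          ((PySem.Set.inter (PySem.Set.ofList ((PySem.Dict.mk fd).getD user [])) active).foldl
            (fun m friend =>
              m.insert friend (((mutual_friends user friend (PySem.Dict.mk fd)).length : Int) + 1))
            PySem.Dict.empty))
        (PySem.Dict.empty : PySem.Dict String (PySem.Dict String Int))).items.map
        (fun p => (p.1, p.2.items)))
      = ((active.foldl (fun w user =>
        w.insert user
          ((PySem.Set.inter (PySem.Set.ofList ((PySem.Dict.mk fd).getD user [])) active).foldl
            (fun m friend => m.insert friend ((countOf fd).getD (user, friend) 0 + 1))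
            PySem.Dict.empty))
        (PySem.Dict.empty : PySem.Dict String (PySem.Dict String Int))).items.map
        (fun p => (p.1, p.2.items))) := by
  rw [fold_insert_items active hact, fold_insert_items active hact, List.map_map, List.map_map]
  apply List.map_congr_left
  intro u _
  simp only [Function.comp]
  congr 1
  rw [fold_insert_items _ (PySem.Set.nodup_inter _ _ (PySem.Set.nodup_ofList _)),
    fold_insert_items _ (PySem.Set.nodup_inter _ _ (PySem.Set.nodup_ofList _))]
  apply List.map_congr_left
  intro f _
  rw [core_equal fd hnd u f]

-- ===== VERDICT (by name: the statement is the Claim_ definition above) =====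
theorem build_weighted_friends_spec : Claim_equal_build_weighted_friends := by
  intro fd ns _ hnd
  unfold Spec_build_weighted_friends
  cases ns with
  | none => exact assemble fd hnd _ (PySem.Set.nodup_ofList _)
  | some l => exact assemble fd hnd _ (PySem.Set.nodup_ofList _)
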